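-- pv_equiv track=rewrite | github.com/DarkBrain-LP/autonomous_turtlebot | wifi_fingerprint_collector/scripts/final/move.py | collect_objects
-- ===== SOURCE A (Python) =====
-- def collect_objects(column_length, row_length):
--     # Initialize the grid with objects at each node
--     grid = [[f"Object({i},{j})" for j in range(row_length)] for i in range(column_length)]
--
--     # Initialize the robot's position
--     robot_position = (0, 0)
--
--     # Initialize a list to keep track of collected objects
--     collected_objects = []
--
--     for col in range(row_length):
--         if col % 2 == 0:  # Moving down the column
--             for row in range(column_length):
--                 robot_position = (row, col)
--                 collected_objects.append(grid[row][col])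
--         else:  # Moving up the column
--             for row in range(column_length - 1, -1, -1):
--                 robot_position = (row, col)
--                 collected_objects.append(grid[row][col])
--
--     return collected_objects
-- ===== SOURCE B (Python) =====
-- def collect_objects(column_length, row_length):
--     # Flat-index formulation: the k-th collected object (k = 0..c*r-1) lies in
--     # column k // c at position k % c, reading rows upward on odd columns.
--     if column_length <= 0 or row_length <= 0:
--         return []
--     c = column_length
--     return [
--         f"Object({k % c if (k // c) % 2 == 0 else c - 1 - k % c},{k // c})"
--         for k in range(c * row_length)
--     ]
-- ===== Notes on version B (the rewrite author's own statement) =====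
-- stated objective: alternative
-- what changed: Replaces A's build-a-grid-then-traverse nested loops by a single flat comprehension over k in range(c*r) that computes each label's (row,col) arithmetically from k (col = k//c, pos = k%c, row reflected to c-1-pos on odd columns).
import Mathlib
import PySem

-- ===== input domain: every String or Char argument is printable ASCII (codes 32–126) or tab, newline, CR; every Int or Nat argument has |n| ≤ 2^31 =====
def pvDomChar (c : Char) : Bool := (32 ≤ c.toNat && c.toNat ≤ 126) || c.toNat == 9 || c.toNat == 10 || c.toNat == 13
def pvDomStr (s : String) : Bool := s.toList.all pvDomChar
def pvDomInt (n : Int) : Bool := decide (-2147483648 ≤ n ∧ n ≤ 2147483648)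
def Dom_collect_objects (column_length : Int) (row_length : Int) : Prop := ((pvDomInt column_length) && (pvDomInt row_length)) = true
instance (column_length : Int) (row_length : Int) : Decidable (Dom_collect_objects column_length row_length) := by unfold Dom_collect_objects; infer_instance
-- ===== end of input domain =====

-- B replaces A's build-a-grid-then-traverse nested loops by one flat loop over
-- k in range(c*r), computing each label's (row,col) arithmetically via divmod
-- (alternative decomposition; same return value).

-- the f-string label f"Object({i},{j})" (shared helper of both ports)
def pvLabel (i : Int) (j : Int) : String :=
  "Object(" ++ PySem.Int.toStr i ++ "," ++ PySem.Int.toStr j ++ ")"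

-- ===== PORT A =====
-- Literal port of A. The dead variable robot_position is dropped (never read).
-- grid[row][col] is ported as pyGetD with a dummy default: both indices are always
-- in range here (row ∈ range(column_length), col ∈ range(row_length)), so Python
-- never raises and the default is never used.
def collect_objects (column_length : Int) (row_length : Int) : List String :=
  let grid : List (List String) :=
    (PySem.List.pyRange 0 column_length).map (fun i =>
      (PySem.List.pyRange 0 row_length).map (fun j => pvLabel i j))
  (PySem.List.pyRange 0 row_length).foldl (fun collected col =>
    if PySem.Int.mod col 2 = 0 then
      (PySem.List.pyRange 0 column_length).foldl (fun acc row =>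
        acc ++ [PySem.List.pyGetD (PySem.List.pyGetD grid row []) col ""]) collected
    else
      (PySem.List.pyRange (column_length - 1) (-1) (-1)).foldl (fun acc row =>
        acc ++ [PySem.List.pyGetD (PySem.List.pyGetD grid row []) col ""]) collected) []

-- ===== PORT B =====
-- Port of Source B: flat comprehension over k ∈ range(c*r); '//' and '%' are
-- floordiv/mod (exact; here k ≥ 0 and c > 0 along the loop).
def collect_objects_alt (column_length : Int) (row_length : Int) : List String :=
  if column_length ≤ 0 ∨ row_length ≤ 0 then []
  else
    (PySem.List.pyRange 0 (column_length * row_length)).map (fun k =>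
      pvLabel (if PySem.Int.mod (PySem.Int.floordiv k column_length) 2 = 0
                then PySem.Int.mod k column_length
                else column_length - 1 - PySem.Int.mod k column_length)
              (PySem.Int.floordiv k column_length))

-- ===== PRECONDITION & SPEC =====
def Spec_collect_objects (column_length : Int) (row_length : Int) (out : List String) : Prop := out = collect_objects_alt column_length row_length
instance (column_length : Int) (row_length : Int) (out : List String) : Decidable (Spec_collect_objects column_length row_length out) := by unfold Spec_collect_objects; infer_instance

-- ===== CLAIM (what is proved, stated in full; the proofs are below) =====
def Claim_equal_collect_objects : Prop := ∀ (column_length : Int) (row_length : Int), Dom_collect_objects column_length row_length → Spec_collect_objects column_length row_length (collect_objects column_length row_length)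

-- ===== LEMMAS AND PROOFS =====

-- the snake-order block of one column, the common normal form of both ports
def pvBlock (c : Int) (col : Int) : List String :=
  if PySem.Int.mod col 2 = 1
  then ((PySem.List.pyRange 0 c).map (fun row => pvLabel row col)).reverse
  else (PySem.List.pyRange 0 c).map (fun row => pvLabel row col)

theorem pv_flatMap_congr {α β : Type} (l : List α) (f g : α → List β)
    (h : ∀ x ∈ l, f x = g x) : l.flatMap f = l.flatMap g := by
  induction l with
  | nil => rfl
  | cons a t ih =>
    simp only [List.flatMap_cons]
    rw [h a (by simp), ih (fun x hx => h x (by simp [hx]))]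

-- grid lookup: inside the ranges, grid[row][col] is exactly the label f"Object({row},{col})"
theorem pv_grid_lookup (column_length row_length row col : Int)
    (hrow : row ∈ PySem.List.pyRange 0 column_length)
    (hcol : col ∈ PySem.List.pyRange 0 row_length) :
    PySem.List.pyGetD
      (PySem.List.pyGetD
        ((PySem.List.pyRange 0 column_length).map (fun i =>
          (PySem.List.pyRange 0 row_length).map (fun j => pvLabel i j))) row [])
      col "" = pvLabel row col := by
  rw [PySem.List.mem_pyRange_one] at hrow hcol
  have hc : column_length = ((column_length.toNat : Nat) : Int) := by omega
  have hr : row_length = ((row_length.toNat : Nat) : Int) := by omega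
  have hrw : row = ((row.toNat : Nat) : Int) := by omega
  have hcw : col = ((col.toNat : Nat) : Int) := by omega
  rw [hc, hrw, PySem.List.pyGetD_map_pyRange _ _ _ _ (by omega)]
  rw [hr, hcw, PySem.List.pyGetD_map_pyRange _ _ _ _ (by omega)]

-- Python's range(n-1, -1, -1) is range(n) reversed (as Int lists)
theorem pv_rev_range (n : Int) :
    PySem.List.pyRange (n - 1) (-1) (-1) = (PySem.List.pyRange 0 n).reverse := by
  have h := PySem.List.pyRange_neg_one_eq_reverse (n - 1) (-1)
  simpa using h

-- A in normal form: the column blocks, concatenated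
theorem pv_A_eq (c r : Int) :
    collect_objects c r = (PySem.List.pyRange 0 r).flatMap (pvBlock c) := by
  unfold collect_objects
  rw [PySem.List.foldl_congr_mem _ _ (fun acc col => acc ++ pvBlock c col) []
        (fun acc col hcol => by
          show _ = acc ++ pvBlock c col
          unfold pvBlock
          rcases PySem.Int.mod_two_eq col with h | h
          · have hne : ¬ PySem.Int.mod col 2 = 1 := by rw [h]; decide
            rw [if_pos h, if_neg hne]
            rw [PySem.List.foldl_congr_mem _ _
                  (fun acc2 row => acc2 ++ [pvLabel row col]) acc
                  (fun acc2 row hrow => by rw [pv_grid_lookup c r row col hrow hcol]),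
                PySem.List.foldl_append_singleton_eq_map]
          · have hne : ¬ PySem.Int.mod col 2 = 0 := by rw [h]; decide
            rw [if_neg hne, if_pos h, pv_rev_range]
            rw [PySem.List.foldl_congr_mem _ _
                  (fun acc2 row => acc2 ++ [pvLabel row col]) acc
                  (fun acc2 row hrow => by
                    rw [pv_grid_lookup c r row col (List.mem_reverse.mp hrow) hcol]),
                PySem.List.foldl_append_singleton_eq_map, List.map_reverse]),
      PySem.List.foldl_append_eq_flatMap]
  simp

-- range(0, c*n) splits into n consecutive width-c ranges
theorem pv_range_mul (c : Int) (hc : 0 < c) (n : Nat) :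
    PySem.List.pyRange 0 (c * n) =
      (PySem.List.pyRange 0 (n : Int)).flatMap
        (fun col => PySem.List.pyRange (col * c) (col * c + c)) := by
  induction n with
  | zero => simp [PySem.List.pyRange_one_eq_nil]
  | succ m ih =>
    have h1 : (0:Int) ≤ c * m := by positivity
    have h2 : c * (m:Int) ≤ c * ((m : Int) + 1) := by nlinarith
    push_cast
    rw [PySem.List.pyRange_one_append 0 (c * m) (c * ((m:Int) + 1)) h1 h2,
        PySem.List.pyRange_one_succ_right (by positivity : (0:Int) ≤ (m:Int)),
        List.flatMap_append]
    push_cast at ih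
    rw [ih]
    congr 1
    simp only [List.flatMap_cons, List.flatMap_nil, List.append_nil]
    congr 1 <;> ring

-- one width-c slice of B's flat loop is exactly one column block
theorem pv_slice_eq_block (c : Int) (hc : 0 < c) (col : Int) (_hcol : 0 ≤ col) :
    (PySem.List.pyRange (col * c) (col * c + c)).map (fun k =>
        pvLabel (if PySem.Int.mod (PySem.Int.floordiv k c) 2 = 0
                  then PySem.Int.mod k c else c - 1 - PySem.Int.mod k c)
                (PySem.Int.floordiv k c))
      = pvBlock c col := by
  have hdiv : ∀ k : Int, col * c ≤ k → k < col * c + c → PySem.Int.floordiv k c = col := by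
    intro k h1 h2
    rw [PySem.Int.floordiv_eq_iff_of_pos hc]
    constructor <;> nlinarith
  have hmod : ∀ k : Int, col * c ≤ k → k < col * c + c →
      PySem.Int.mod k c = k - col * c := by
    intro k h1 h2
    have hfm := PySem.Int.floordiv_mul_add_mod k c
    rw [hdiv k h1 h2] at hfm
    linarith
  have hstep : (PySem.List.pyRange (col * c) (col * c + c)).map (fun k =>
        pvLabel (if PySem.Int.mod (PySem.Int.floordiv k c) 2 = 0
                  then PySem.Int.mod k c else c - 1 - PySem.Int.mod k c)
                (PySem.Int.floordiv k c))
      = (PySem.List.pyRange (col * c) (col * c + c)).map (fun k =>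
        pvLabel (if PySem.Int.mod col 2 = 0
                  then k - col * c else c - 1 - (k - col * c)) col) :=
    List.map_congr_left (by
      intro k hk
      rw [PySem.List.mem_pyRange_one] at hk
      rw [hdiv k hk.1 hk.2, hmod k hk.1 hk.2])
  rw [hstep]
  unfold pvBlock
  have hw : col * c + c - col * c = c := by ring
  rcases PySem.Int.mod_two_eq col with h | h
  · have hne : ¬ PySem.Int.mod col 2 = 1 := by rw [h]; decide
    rw [if_neg hne, PySem.List.pyRange_one (col * c), PySem.List.pyRange_one 0 c, hw, sub_zero]
    simp only [List.map_map]
    apply List.map_congr_left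
    intro j _
    simp only [Function.comp_apply, if_pos h]
    congr 1
    ring
  · have hne : ¬ PySem.Int.mod col 2 = 0 := by rw [h]; decide
    rw [if_pos h, ← List.map_reverse, ← pv_rev_range,
        PySem.List.pyRange_neg_one (c - 1) (-1), PySem.List.pyRange_one (col * c), hw]
    have hcnt : (c - 1 - (-1)).toNat = c.toNat := by omega
    rw [hcnt]
    simp only [List.map_map]
    apply List.map_congr_left
    intro j _
    simp only [Function.comp_apply, if_neg hne]
    congr 1
    ring

-- ===== VERDICT (by name: the statement is the Claim_ definition above) =====
theorem collect_objects_spec : Claim_equal_collect_objects := by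
  intro c r _
  unfold Spec_collect_objects collect_objects_alt
  by_cases h : c ≤ 0 ∨ r ≤ 0
  · rw [if_pos h, pv_A_eq]
    rcases h with hc | hr
    · rw [List.flatMap_eq_nil_iff.mpr]
      intro col _
      unfold pvBlock
      rw [PySem.List.pyRange_one_eq_nil hc]
      split <;> simp
    · rw [PySem.List.pyRange_one_eq_nil hr]; rfl
  · push_neg at h
    obtain ⟨hc, hr⟩ := h
    rw [if_neg (by omega), pv_A_eq]
    have hr' : r = ((r.toNat : Nat) : Int) := by omega
    rw [hr', pv_range_mul c (by omega) r.toNat, List.map_flatMap]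
    exact (pv_flatMap_congr _ _ _ (fun col hcol => by
      rw [PySem.List.mem_pyRange_one] at hcol
      exact pv_slice_eq_block c (by omega) col hcol.1)).symm
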